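-- pv_equiv track=rewrite | github.com/TejasKashyap7/Lazy- | region_finder.py | region_finder
-- ===== SOURCE A (Python) =====
-- region={
--
--     'North_India':['Haryana','Himachal Pradesh','Punjab','Rajasthan',' Chandigarh','Delhi','Kashmir ','Jammu','Ladakh'],
--     'East_India':['Bihar','West Bengal','Bihar','Assam','Arunachal Pradesh','Nagaland','Sikkim ','Tripura'],
--     'North_East':['Mizoram','manipur','Meghalaya'],
--     'South_India':['Andhra Pradesh', 'Karnataka', 'Kerala', 'Tamil Nadu','Telangana','Puducherry','Lakshdweep','Andaman and Nicobar Island'],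
--     'West_India':['Gujarat','Maharashtra','Goa','Dadar and Nagar haveli','Daman and Diu']
-- }
--
-- def region_finder(state):
--     '''
--     This function is used to define in which area is the state/Union Teratory you are entring is in
--     '''
--     list_regions=region.keys()
--     for regions in list_regions: # region.keys = list of regions
--         list_state=region.get(regions)
--         if state in list_state:
--             return(regions)
--         else :
--             continue
-- ===== SOURCE B (Python) =====
-- # Precomputed reverse lookup table: state -> region (written out flat; no state
-- # belongs to two regions, so this matches the first-match scan of the original).
-- _STATE_TO_REGION = {
--     'Haryana': 'North_India', 'Himachal Pradesh': 'North_India',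
--     'Punjab': 'North_India', 'Rajasthan': 'North_India',
--     ' Chandigarh': 'North_India', 'Delhi': 'North_India',
--     'Kashmir ': 'North_India', 'Jammu': 'North_India', 'Ladakh': 'North_India',
--     'Bihar': 'East_India', 'West Bengal': 'East_India', 'Assam': 'East_India',
--     'Arunachal Pradesh': 'East_India', 'Nagaland': 'East_India',
--     'Sikkim ': 'East_India', 'Tripura': 'East_India',
--     'Mizoram': 'North_East', 'manipur': 'North_East', 'Meghalaya': 'North_East',
--     'Andhra Pradesh': 'South_India', 'Karnataka': 'South_India',
--     'Kerala': 'South_India', 'Tamil Nadu': 'South_India',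
--     'Telangana': 'South_India', 'Puducherry': 'South_India',
--     'Lakshdweep': 'South_India', 'Andaman and Nicobar Island': 'South_India',
--     'Gujarat': 'West_India', 'Maharashtra': 'West_India', 'Goa': 'West_India',
--     'Dadar and Nagar haveli': 'West_India', 'Daman and Diu': 'West_India',
-- }
--
-- def region_finder(state):
--     '''
--     This function is used to define in which area is the state/Union Teratory you are entring is in
--     '''
--     return _STATE_TO_REGION.get(state)
-- ===== Notes on version B (the rewrite author's own statement) =====
-- stated objective: idiomatic
-- what changed: A scans every region's state list on each call; B looks the state up in a flat precomputed reverse table (state -> region) built once at module level, with no loop in the call at all.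
import Mathlib
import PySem

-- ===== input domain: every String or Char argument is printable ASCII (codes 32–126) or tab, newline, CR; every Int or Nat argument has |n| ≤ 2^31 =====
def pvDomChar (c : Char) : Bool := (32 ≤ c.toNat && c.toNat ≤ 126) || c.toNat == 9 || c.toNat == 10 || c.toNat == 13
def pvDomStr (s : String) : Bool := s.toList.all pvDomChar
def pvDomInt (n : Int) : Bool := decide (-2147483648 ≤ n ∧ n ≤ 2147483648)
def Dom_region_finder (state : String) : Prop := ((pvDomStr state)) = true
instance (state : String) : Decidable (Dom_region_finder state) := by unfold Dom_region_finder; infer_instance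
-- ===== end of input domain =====

-- B replaces A's per-call scan over every region's state list by a flat precomputed
-- reverse lookup table (state -> region), so the call is one dict lookup (idiomatic).

-- ===== PORT A =====
-- the module-level dict 'region' as an association list in insertion order
def regionData : List (String × List String) :=
  [("North_India", ["Haryana", "Himachal Pradesh", "Punjab", "Rajasthan", " Chandigarh", "Delhi", "Kashmir ", "Jammu", "Ladakh"]),
   ("East_India", ["Bihar", "West Bengal", "Bihar", "Assam", "Arunachal Pradesh", "Nagaland", "Sikkim ", "Tripura"]),
   ("North_East", ["Mizoram", "manipur", "Meghalaya"]),
   ("South_India", ["Andhra Pradesh", "Karnataka", "Kerala", "Tamil Nadu", "Telangana", "Puducherry", "Lakshdweep", "Andaman and Nicobar Island"]),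
   ("West_India", ["Gujarat", "Maharashtra", "Goa", "Dadar and Nagar haveli", "Daman and Diu"])]

-- the 'for regions in list_regions: if state in list_state: return regions' loop
def regionFinderLoop (state : String) : List (String × List String) → Option String
  | [] => none
  | (regions, list_state) :: rest =>
      if state ∈ list_state then some regions else regionFinderLoop state rest

def region_finder (state : String) : Option String :=
  regionFinderLoop state regionData

-- ===== PORT B =====
-- the module-level literal dict _STATE_TO_REGION (state -> region), written out flat
def stateToRegion : PySem.Dict String String := PySem.Dict.ofList
  [("Haryana", "North_India"), ("Himachal Pradesh", "North_India"),
   ("Punjab", "North_India"), ("Rajasthan", "North_India"),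
   (" Chandigarh", "North_India"), ("Delhi", "North_India"),
   ("Kashmir ", "North_India"), ("Jammu", "North_India"), ("Ladakh", "North_India"),
   ("Bihar", "East_India"), ("West Bengal", "East_India"), ("Assam", "East_India"),
   ("Arunachal Pradesh", "East_India"), ("Nagaland", "East_India"),
   ("Sikkim ", "East_India"), ("Tripura", "East_India"),
   ("Mizoram", "North_East"), ("manipur", "North_East"), ("Meghalaya", "North_East"),
   ("Andhra Pradesh", "South_India"), ("Karnataka", "South_India"),
   ("Kerala", "South_India"), ("Tamil Nadu", "South_India"),
   ("Telangana", "South_India"), ("Puducherry", "South_India"),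
   ("Lakshdweep", "South_India"), ("Andaman and Nicobar Island", "South_India"),
   ("Gujarat", "West_India"), ("Maharashtra", "West_India"), ("Goa", "West_India"),
   ("Dadar and Nagar haveli", "West_India"), ("Daman and Diu", "West_India")]

def region_finder_alt (state : String) : Option String :=
  stateToRegion.get? state

-- ===== PRECONDITION & SPEC =====
def Spec_region_finder (state : String) (out : Option String) : Prop := out = region_finder_alt state
instance (state : String) (out : Option String) : Decidable (Spec_region_finder state out) := by unfold Spec_region_finder; infer_instance

-- ===== CLAIM (what is proved, stated in full; the proofs are below) =====
def Claim_equal_region_finder : Prop := ∀ (state : String), Dom_region_finder state → Spec_region_finder state (region_finder state)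

-- ===== LEMMAS AND PROOFS =====
-- every state name occurring in regionData
def allStates : List String := (regionData.map Prod.snd).flatten

theorem loop_none (s : String) (L : List (String × List String))
    (h : ∀ p ∈ L, s ∉ p.2) : regionFinderLoop s L = none := by
  induction L with
  | nil => rfl
  | cons p rest ih =>
    rcases p with ⟨r, sts⟩
    simp only [regionFinderLoop, if_neg (h (r, sts) List.mem_cons_self)]
    exact ih (fun q hq => h q (List.mem_cons_of_mem _ hq))

-- every key of the reverse table is a state name of regionData
theorem keys_sub : ∀ k ∈ stateToRegion.keys, k ∈ allStates := by decide

-- ===== VERDICT (by name: the statement is the Claim_ definition above) =====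
set_option maxRecDepth 4000 in
theorem region_finder_spec : Claim_equal_region_finder := by
  intro s _
  unfold Spec_region_finder
  by_cases h : s ∈ allStates
  · -- s is one of the literal state names: check each case by computation
    fin_cases h <;> decide
  · -- s matches no state name: both sides are none
    have hm : ∀ p ∈ regionData, s ∉ p.2 := by
      intro p hp hmem
      exact h (List.mem_flatten.mpr ⟨p.2, List.mem_map.mpr ⟨p, hp, rfl⟩, hmem⟩)
    rw [show region_finder s = none from loop_none s regionData hm,
        show region_finder_alt s = none from
          (PySem.Dict.get?_eq_none_iff_not_mem_keys stateToRegion s).mpr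
            (fun hk => h (keys_sub s hk))]
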